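-- pv_equiv track=rewrite | github.com/07734willy/Python-Playground | exercises/exercise1/comprehensions2.py | remainder_one
-- ===== SOURCE A (Python) =====
-- def remainder_one(elements):
--     out = []
--     counter = 0
--     for element in elements:
--         if counter % 5 != 1:
--             out.append(element)
--         counter += 1
--     return out
-- ===== SOURCE B (Python) =====
-- from itertools import islice
--
-- def remainder_one(elements):
--     out = []
--     it = iter(elements)
--     while True:
--         block = list(islice(it, 5))
--         if not block:
--             break
--         if len(block) >= 2:
--             out.extend(block[:1] + block[2:])
--         else:
--             out.extend(block)
--     return out
-- ===== Notes on version B (the rewrite author's own statement) =====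
-- stated objective: alternative
-- what changed: Instead of a per-element counter with a mod-5 test, B consumes the iterable in blocks of 5 via itertools.islice and drops each block's local index 1 (when the block has at least 2 items), so no counter or modulo is maintained.
import Mathlib
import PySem

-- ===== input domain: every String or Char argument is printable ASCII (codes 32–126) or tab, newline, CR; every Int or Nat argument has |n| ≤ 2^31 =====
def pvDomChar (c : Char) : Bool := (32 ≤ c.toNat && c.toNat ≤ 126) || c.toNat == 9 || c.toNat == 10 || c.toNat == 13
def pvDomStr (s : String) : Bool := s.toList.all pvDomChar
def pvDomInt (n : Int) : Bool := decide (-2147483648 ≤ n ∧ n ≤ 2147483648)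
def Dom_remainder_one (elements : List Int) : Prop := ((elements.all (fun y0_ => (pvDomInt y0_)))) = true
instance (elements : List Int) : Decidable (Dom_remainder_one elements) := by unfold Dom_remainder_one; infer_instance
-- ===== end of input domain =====

-- ===== PORT A =====
-- B consumes blocks of 5 and drops each block's local index 1; A keeps a counter with a mod-5 test. Same values, different decomposition.
-- A's loop body, as a named step function (literal transliteration of the for-body).
def pvStepA (s : List Int × Int) (element : Int) : List Int × Int :=
  (if s.2 % 5 ≠ 1 then s.1 ++ [element] else s.1, s.2 + 1)

def remainder_one (elements : List Int) : List Int :=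
  (elements.foldl pvStepA ([], 0)).1

-- ===== PORT B =====
def remainder_one_alt (elements : List Int) : List Int :=
  if h : elements = [] then []
  else
    let block := elements.take 5
    let kept := if block.length ≥ 2 then block.take 1 ++ block.drop 2 else block
    kept ++ remainder_one_alt (elements.drop 5)
termination_by elements.length
decreasing_by
  cases elements with
  | nil => exact absurd rfl h
  | cons a t => simp [List.length_drop]

-- ===== PRECONDITION & SPEC =====
def Spec_remainder_one (elements : List Int) (out : List Int) : Prop := out = remainder_one_alt elements
instance (elements : List Int) (out : List Int) : Decidable (Spec_remainder_one elements out) := by unfold Spec_remainder_one; infer_instance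

-- ===== CLAIM (what is proved, stated in full; the proofs are below) =====
def Claim_equal_remainder_one : Prop := ∀ (elements : List Int), Dom_remainder_one elements → Spec_remainder_one elements (remainder_one elements)

-- ===== LEMMAS AND PROOFS =====

theorem pvAlt_nil : remainder_one_alt [] = [] := by
  rw [remainder_one_alt]; simp

theorem pvFoldA_acc (xs : List Int) (acc : List Int) (c : Int) :
    (xs.foldl pvStepA (acc, c)).1 = acc ++ (xs.foldl pvStepA ([], c)).1 := by
  induction xs generalizing acc c with
  | nil => simp
  | cons a t ih =>
    simp only [List.foldl_cons, pvStepA]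
    by_cases hc : c % 5 ≠ 1
    · rw [if_pos hc, if_pos hc, ih (acc ++ [a]) (c + 1), ih ([] ++ [a]) (c + 1)]
      simp
    · rw [if_neg hc, if_neg hc, ih acc (c + 1)]

theorem pvFoldA_chunk (xs : List Int) (c : Int) (hc : c % 5 = 0) :
    (xs.foldl pvStepA ([], c)).1 = remainder_one_alt xs := by
  induction hn : xs.length using Nat.strong_induction_on generalizing xs c with
  | _ n ih =>
  match xs with
  | [] => simp [pvAlt_nil]
  | [a] =>
    have h1 : c % 5 ≠ 1 := by omega
    rw [remainder_one_alt]; simp [List.foldl, pvStepA, h1, pvAlt_nil]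
  | [a, b] =>
    have h1 : c % 5 ≠ 1 := by omega
    have h2 : ¬ (c + 1) % 5 ≠ 1 := by omega
    rw [remainder_one_alt]; simp [List.foldl, pvStepA, h1, h2, pvAlt_nil]
  | [a, b, x] =>
    have h1 : c % 5 ≠ 1 := by omega
    have h2 : ¬ (c + 1) % 5 ≠ 1 := by omega
    have h3 : (c + 1 + 1) % 5 ≠ 1 := by omega
    rw [remainder_one_alt]; simp [List.foldl, pvStepA, h1, h2, h3, pvAlt_nil]
  | [a, b, x, y] =>
    have h1 : c % 5 ≠ 1 := by omega
    have h2 : ¬ (c + 1) % 5 ≠ 1 := by omega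
    have h3 : (c + 1 + 1) % 5 ≠ 1 := by omega
    have h4 : (c + 1 + 1 + 1) % 5 ≠ 1 := by omega
    rw [remainder_one_alt]; simp [List.foldl, pvStepA, h1, h2, h3, h4, pvAlt_nil]
  | a :: b :: x :: y :: z :: rest =>
    have h1 : c % 5 ≠ 1 := by omega
    have h2 : ¬ (c + 1) % 5 ≠ 1 := by omega
    have h3 : (c + 1 + 1) % 5 ≠ 1 := by omega
    have h4 : (c + 1 + 1 + 1) % 5 ≠ 1 := by omega
    have h5 : (c + 1 + 1 + 1 + 1) % 5 ≠ 1 := by omega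
    have hc5 : (c + 1 + 1 + 1 + 1 + 1) % 5 = 0 := by omega
    have hrest : (rest.foldl pvStepA ([], c + 1 + 1 + 1 + 1 + 1)).1 = remainder_one_alt rest := by
      subst hn
      exact ih rest.length (by simp; omega) rest _ hc5 rfl
    simp only [List.foldl_cons, pvStepA, h1, h2, h3, h4, h5, ite_not]
    rw [show remainder_one_alt (a :: b :: x :: y :: z :: rest)
          = [a, x, y, z] ++ remainder_one_alt rest by
        rw [remainder_one_alt]; simp]
    rw [pvFoldA_acc, hrest]
    simp

-- ===== VERDICT (by name: the statement is the Claim_ definition above) =====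
theorem remainder_one_spec : Claim_equal_remainder_one := by
  intro elements _
  exact pvFoldA_chunk elements 0 rfl
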